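-- pv_equiv track=rewrite | github.com/romeorizzi/temi_prog_public | 2019.02.27.recupero/all-CMS-submissions-2019-02-27/20190227T103918.VR429228000.conta-minimi-storici.py | conta_minimi_storici_pari
-- ===== SOURCE A (Python) =====
-- def conta_minimi_storici_pari(st_list):
--     count=0
--     if (st_list[0]%2)==0:
--         count=count+1
--     i=1
--     l=len(st_list)
--     m=st_list[0]
--     while (i<l):
--         if st_list[i]<m:
--             if (st_list[i]%2)==0:
--                 count=count+1
--             m=st_list[i]
--         i=i+1
--     return count # risposta corretta ad esempio se tutti i numeri sono dispari
-- ===== SOURCE B (Python) =====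
-- def conta_minimi_storici_pari(st_list):
--     prefix = [st_list[0]]
--     for x in st_list[1:]:
--         prefix.append(min(prefix[-1], x))
--     return sum(1 for i, x in enumerate(st_list)
--                if x % 2 == 0 and (i == 0 or x < prefix[i - 1]))
-- ===== Notes on version B (the rewrite author's own statement) =====
-- stated objective: alternative
-- what changed: Replaces A's single interleaved min-tracking while-loop with two passes: first materialize the prefix-minima table, then count even strict record lows by comparing each element against the table.
import Mathlib
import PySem

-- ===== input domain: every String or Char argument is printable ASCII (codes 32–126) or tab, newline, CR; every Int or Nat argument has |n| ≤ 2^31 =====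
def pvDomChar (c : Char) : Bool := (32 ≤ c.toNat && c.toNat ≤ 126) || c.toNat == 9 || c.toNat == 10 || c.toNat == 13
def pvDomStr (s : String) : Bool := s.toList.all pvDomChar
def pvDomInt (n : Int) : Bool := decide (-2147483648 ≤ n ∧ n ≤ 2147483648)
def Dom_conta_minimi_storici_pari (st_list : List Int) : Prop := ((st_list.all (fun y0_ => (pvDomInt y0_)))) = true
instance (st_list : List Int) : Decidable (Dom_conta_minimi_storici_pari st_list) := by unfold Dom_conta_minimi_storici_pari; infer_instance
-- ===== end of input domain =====

-- B replaces A's single interleaved min-tracking loop with a prefix-minima table pass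
-- followed by a counting pass (an alternative decomposition, not claimed faster).
-- ===== PORT A =====
def conta_minimi_storici_pari (st_list : List Int) : Int :=
  match PySem.List.pyGet? st_list 0 with
  | none => 0  -- indexing the first element raises IndexError here: excluded by Pre_
  | some first =>
    let count0 : Int := if PySem.Int.mod first 2 = 0 then 1 else 0
    -- while (i < l): visits st_list[1], …, st_list[l-1] carrying (count, m)
    let res := (st_list.drop 1).foldl
      (fun (s : Int × Int) x =>
        if x < s.2 then
          (if PySem.Int.mod x 2 = 0 then s.1 + 1 else s.1, x)
        else s)
      (count0, first)
    res.1

-- ===== PORT B =====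
def conta_minimi_storici_pari_alt (st_list : List Int) : Int :=
  match st_list with
  | [] => 0  -- indexing the first element raises IndexError here: excluded by Pre_
  | x0 :: rest =>
    -- prefix starts as the singleton of the first element; each later x appends min(prefix[-1], x)
    let pref := rest.foldl
      (fun (acc : List Int) x =>
        acc ++ [min ((PySem.List.pyGet? acc (-1)).getD 0) x])
      [x0]
    -- sum(1 for i, x in enumerate(st_list) if x % 2 == 0 and (i == 0 or x < prefix[i-1]))
    (PySem.List.enumerate (x0 :: rest) 0).foldl
      (fun (c : Int) p =>
        if PySem.Int.mod p.2 2 = 0 ∧ (p.1 = 0 ∨ p.2 < ((PySem.List.pyGet? pref (p.1 - 1)).getD 0))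
        then c + 1 else c)
      0

-- ===== PRECONDITION & SPEC =====
-- A (and B) index the first element unconditionally, raising IndexError on the empty list.
def Pre_conta_minimi_storici_pari (st_list : List Int) : Prop := st_list ≠ []
instance (st_list : List Int) : Decidable (Pre_conta_minimi_storici_pari st_list) := by unfold Pre_conta_minimi_storici_pari; infer_instance
def pvWitness_conta_minimi_storici_pari : List Int := [2, 1, -4, 3]
def Spec_conta_minimi_storici_pari (st_list : List Int) (out : Int) : Prop := out = conta_minimi_storici_pari_alt st_list
instance (st_list : List Int) (out : Int) : Decidable (Spec_conta_minimi_storici_pari st_list out) := by unfold Spec_conta_minimi_storici_pari; infer_instance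

-- ===== CLAIM (what is proved, stated in full; the proofs are below) =====
def Claim_equal_conta_minimi_storici_pari : Prop := ∀ (st_list : List Int), Dom_conta_minimi_storici_pari st_list → Pre_conta_minimi_storici_pari st_list → Spec_conta_minimi_storici_pari st_list (conta_minimi_storici_pari st_list)

-- ===== LEMMAS AND PROOFS =====

-- reference count: number of even values among strict new minimums of m :: xs (excluding m itself)
def pvCnt (m : Int) : List Int → Int
  | [] => 0
  | x :: xs => if x < m then (if PySem.Int.mod x 2 = 0 then 1 else 0) + pvCnt x xs else pvCnt m xs

-- running minimums of m applied through xs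
def pvMins (m : Int) : List Int → List Int
  | [] => []
  | x :: xs => min m x :: pvMins (min m x) xs

theorem pvA_loop (xs : List Int) : ∀ (c m : Int),
    (xs.foldl (fun (s : Int × Int) x =>
        if x < s.2 then (if PySem.Int.mod x 2 = 0 then s.1 + 1 else s.1, x) else s) (c, m)).1
      = c + pvCnt m xs := by
  induction xs with
  | nil => intro c m; simp [pvCnt]
  | cons x xs ih =>
    intro c m
    simp only [List.foldl_cons, pvCnt]
    by_cases hx : x < m
    · rw [if_pos hx, if_pos hx, ih]
      by_cases he : PySem.Int.mod x 2 = 0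
      · rw [if_pos he, if_pos he]; ring
      · rw [if_neg he, if_neg he]; ring
    · rw [if_neg hx, if_neg hx, ih]

theorem pvB_prefix (xs : List Int) : ∀ (pre : List Int) (m : Int),
    (xs.foldl (fun (acc : List Int) x =>
        acc ++ [min ((PySem.List.pyGet? acc (-1)).getD 0) x]) (pre ++ [m]))
      = pre ++ m :: pvMins m xs := by
  induction xs with
  | nil => intro pre m; simp [pvMins]
  | cons x xs ih =>
    intro pre m
    simp only [List.foldl_cons, PySem.List.pyGet?_neg_one_append_singleton, Option.getD_some]
    have := ih (pre ++ [m]) (min m x)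
    simpa [pvMins, List.append_assoc] using this

theorem pvB_count (xs : List Int) : ∀ (pref : List Int) (m c : Int),
    ((PySem.List.enumerate xs ((pref.length : Int) + 1)).foldl
      (fun (c : Int) p =>
        if PySem.Int.mod p.2 2 = 0 ∧ (p.1 = 0 ∨ p.2 < ((PySem.List.pyGet? (pref ++ m :: pvMins m xs) (p.1 - 1)).getD 0))
        then c + 1 else c) c)
      = c + pvCnt m xs := by
  induction xs with
  | nil => intro pref m c; simp [pvCnt, PySem.List.enumerate]
  | cons x xs ih =>
    intro pref m c
    rw [PySem.List.enumerate_cons]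
    simp only [List.foldl_cons]
    have hget : PySem.List.pyGet? (pref ++ m :: pvMins m (x :: xs)) ((pref.length : Int) + 1 - 1) = some m := by
      rw [show ((pref.length : Int) + 1 - 1) = (pref.length : Int) by ring]
      exact PySem.List.pyGet?_append_length pref (pvMins m (x :: xs)) m
    have hcond : (PySem.Int.mod x 2 = 0 ∧ (((pref.length : Int) + 1) = 0 ∨
        x < ((PySem.List.pyGet? (pref ++ m :: pvMins m (x :: xs)) (((pref.length : Int) + 1) - 1)).getD 0)))
        ↔ (PySem.Int.mod x 2 = 0 ∧ x < m) := by
      rw [hget]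
      constructor
      · rintro ⟨h1, h2 | h2⟩
        · exact absurd h2 (by positivity)
        · exact ⟨h1, by simpa using h2⟩
      · rintro ⟨h1, h2⟩; exact ⟨h1, Or.inr (by simpa using h2)⟩
    have hlist : pref ++ m :: pvMins m (x :: xs) = (pref ++ [m]) ++ min m x :: pvMins (min m x) xs := by
      simp [pvMins, List.append_assoc]
    have hih := ih (pref ++ [m]) (min m x)
      (if PySem.Int.mod x 2 = 0 ∧ x < m then c + 1 else c)
    rw [← hlist] at hih
    have hlen : ((pref ++ [m]).length : Int) + 1 = (pref.length : Int) + 1 + 1 := by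
      simp
    rw [hlen] at hih
    rw [if_congr hcond rfl rfl, hih, pvCnt]
    by_cases hx : x < m
    · rw [min_eq_right (le_of_lt hx), if_pos hx]
      by_cases he : PySem.Int.mod x 2 = 0
      · rw [if_pos ⟨he, hx⟩, if_pos he]; ring
      · rw [if_neg (fun h => he h.1), if_neg he]; ring
    · rw [min_eq_left (le_of_not_gt hx), if_neg (fun h => hx h.2), if_neg hx]

theorem pvAlt_eq (x0 : Int) (rest : List Int) :
    conta_minimi_storici_pari_alt (x0 :: rest)
      = (if PySem.Int.mod x0 2 = 0 then (1:Int) else 0) + pvCnt x0 rest := by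
  show (PySem.List.enumerate (x0 :: rest) 0).foldl _ 0 = _
  have hpre : (rest.foldl (fun (acc : List Int) x =>
      acc ++ [min ((PySem.List.pyGet? acc (-1)).getD 0) x]) [x0]) = x0 :: pvMins x0 rest := by
    simpa using pvB_prefix rest [] x0
  rw [hpre, PySem.List.enumerate_cons, List.foldl_cons]
  have hstep : (if PySem.Int.mod x0 2 = 0 ∧ ((0:Int) = 0 ∨ x0 < ((PySem.List.pyGet? (x0 :: pvMins x0 rest) ((0:Int) - 1)).getD 0)) then (0:Int) + 1 else 0)
      = (if PySem.Int.mod x0 2 = 0 then (1:Int) else 0) := by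
    by_cases he : PySem.Int.mod x0 2 = 0
    · rw [if_pos ⟨he, Or.inl rfl⟩, if_pos he]; norm_num
    · rw [if_neg (fun h => he h.1), if_neg he]
  rw [hstep]
  have := pvB_count rest [] x0 (if PySem.Int.mod x0 2 = 0 then (1:Int) else 0)
  simpa using this

-- ===== VERDICT (by name: the statement is the Claim_ definition above) =====
theorem conta_minimi_storici_pari_spec : Claim_equal_conta_minimi_storici_pari := by
  intro st_list _ hpre
  unfold Spec_conta_minimi_storici_pari
  match st_list with
  | [] => exact absurd rfl hpre
  | x0 :: rest =>
    rw [pvAlt_eq]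
    show (match PySem.List.pyGet? (x0 :: rest) 0 with
      | none => (0:Int)
      | some first =>
        let count0 : Int := if PySem.Int.mod first 2 = 0 then 1 else 0
        (((x0 :: rest).drop 1).foldl
          (fun (s : Int × Int) x =>
            if x < s.2 then (if PySem.Int.mod x 2 = 0 then s.1 + 1 else s.1, x) else s)
          (count0, first)).1) = _
    rw [PySem.List.pyGet?_zero_cons]
    simpa using pvA_loop rest (if PySem.Int.mod x0 2 = 0 then (1:Int) else 0) x0
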